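-- pv_equiv track=rewrite | github.com/FlyingPumba/InterpBench | k8s/launch_iit_eval_jobs.py | build_wandb_name
-- ===== SOURCE A (Python) =====
-- from typing import List
--
-- def build_wandb_name(command: List[str]):
--     if any("--wandb-name=" in part for part in command):
--         for part in command:
--             if "--wandb-name=" in part:
--                 return part.split("=")[1].replace("_", "-")
--
--     # Use a set of important arguments for our experiment to build the wandb name.
--     # Each argument will be separated by a dash. We also define an alias for each argument so that the name is more readable.
--     important_args_aliases = {
--         "i": "case",
--         "seed": "seed",
--         "s": "s",
--         "b": "b",
--         "iit": "iit",
--     }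
--     important_args = important_args_aliases.keys()
--     wandb_name = ""
--
--     # wandb_name += command[3] + "-"  # training method
--
--     for arg in important_args:
--         for part in command:
--             if part.startswith(f"-{arg}") or part.startswith(f"--{arg}"):
--                 alias = important_args_aliases[arg]
--                 if "=" in part:
--                     arg_value = part.split("=")[1].replace("_", "-")
--                     wandb_name += f"{alias}-{arg_value}-"
--                 else:
--                     wandb_name += f"{alias}-"
--
--                 break
--
--     # remove last dash from wandb_name
--     wandb_name = wandb_name[:-1]
--
--     assert wandb_name != "", f"wandb_name is empty. command: {command}"
--
--     return wandb_name
-- ===== SOURCE B (Python) =====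
-- from typing import List
--
-- def build_wandb_name(command: List[str]):
--     for part in command:
--         if "--wandb-name=" in part:
--             return part.split("=")[1].replace("_", "-")
--
--     important_args_aliases = {
--         "i": "case",
--         "seed": "seed",
--         "s": "s",
--         "b": "b",
--         "iit": "iit",
--     }
--     # One pass over command: remember, per important arg, the first part that
--     # prefix-matches it (a single part may serve several args).
--     first_match = {}
--     for part in command:
--         for arg in important_args_aliases:
--             if arg not in first_match and (
--                 part.startswith("-" + arg) or part.startswith("--" + arg)
--             ):
--                 first_match[arg] = part
--     pieces = []
--     for arg, alias in important_args_aliases.items():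
--         if arg in first_match:
--             part = first_match[arg]
--             if "=" in part:
--                 pieces.append(alias + "-" + part.split("=")[1].replace("_", "-"))
--             else:
--                 pieces.append(alias)
--     wandb_name = "-".join(pieces)
--     assert wandb_name != "", f"wandb_name is empty. command: {command}"
--     return wandb_name
-- ===== Notes on version B (the rewrite author's own statement) =====
-- stated objective: alternative
-- what changed: Replaces A's per-argument rescan of command (one find-first scan of command for each of the five important args) and its string accumulation with a stripped trailing dash by a single pass over command that records in a dict the first part prefix-matching each arg, then emits the pieces in the fixed arg order and joins them with '-'.
-- outside the precondition, e.g. on build_wandb_name(['foo', 'bar']): A raises AssertionError, B raises AssertionError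
import Mathlib
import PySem

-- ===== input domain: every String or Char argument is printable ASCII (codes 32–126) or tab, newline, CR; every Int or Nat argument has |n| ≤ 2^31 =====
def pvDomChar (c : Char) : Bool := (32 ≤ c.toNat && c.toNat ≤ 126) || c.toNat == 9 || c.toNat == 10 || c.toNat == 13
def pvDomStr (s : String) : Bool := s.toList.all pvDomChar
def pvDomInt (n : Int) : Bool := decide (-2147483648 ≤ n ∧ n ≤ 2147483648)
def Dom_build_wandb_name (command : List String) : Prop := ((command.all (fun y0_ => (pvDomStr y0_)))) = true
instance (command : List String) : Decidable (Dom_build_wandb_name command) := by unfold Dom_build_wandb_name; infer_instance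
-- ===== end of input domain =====

-- B replaces A's per-argument rescan of `command` and dash-stripped string accumulation by a
-- single pass over `command` recording the first prefix-match per important arg in a dict,
-- then joining the pieces with "-" (alternative decomposition; return value only, no side effects).

-- ===== PORT A =====
-- shared vocabulary of both Pythons (the literal table / the literal `part.split("=")[1].replace("_","-")` line)
def pvAliases : List (String × String) :=
  [("i", "case"), ("seed", "seed"), ("s", "s"), ("b", "b"), ("iit", "iit")]

def pvVal (part : String) : String :=
  PySem.Str.replace (PySem.List.pyGetD ((PySem.Str.split? part "=").getD []) 1 "") "_" "-"

def pvMatches (arg part : String) : Bool :=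
  PySem.Str.startswith part ("-" ++ arg) || PySem.Str.startswith part ("--" ++ arg)

def build_wandb_name (command : List String) : String :=
  if command.any (fun part => PySem.Str.isIn "--wandb-name=" part) then
    match command.find? (fun part => PySem.Str.isIn "--wandb-name=" part) with
    | some part => pvVal part
    | none => ""  -- unreachable: the `any` guard guarantees a match
  else
    let wandb_name : String := pvAliases.foldl (fun acc pa =>
      match command.find? (fun part => pvMatches pa.1 part) with
      | some part =>
          if PySem.Str.isIn "=" part then acc ++ (pa.2 ++ "-" ++ pvVal part ++ "-")
          else acc ++ (pa.2 ++ "-")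
      | none => acc) ""
    PySem.Str.slice wandb_name none (some (-1))   -- wandb_name[:-1]; the assert is excluded by Pre_

-- ===== PORT B =====
def build_wandb_name_alt (command : List String) : String :=
  match command.find? (fun part => PySem.Str.isIn "--wandb-name=" part) with
  | some part => pvVal part
  | none =>
    let first_match : PySem.Dict String String := command.foldl (fun d part =>
      pvAliases.foldl (fun d pa =>
        if (d.get? pa.1).isNone && pvMatches pa.1 part then d.insert pa.1 part else d) d)
      PySem.Dict.empty
    let pieces : List String := pvAliases.foldl (fun ps pa =>
      match first_match.get? pa.1 with
      | some part =>
          ps ++ [if PySem.Str.isIn "=" part then pa.2 ++ "-" ++ pvVal part else pa.2]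
      | none => ps) []
    PySem.Str.join "-" pieces   -- the assert is excluded by Pre_

-- ===== PRECONDITION & SPEC =====
-- Pre_ excludes exactly the inputs on which Python A raises AssertionError ("wandb_name is empty"):
-- no part contains "--wandb-name=" and no part prefix-matches an important argument.
def Pre_build_wandb_name (command : List String) : Prop :=
  (command.any (fun part => PySem.Str.isIn "--wandb-name=" part
    || (["i", "seed", "s", "b", "iit"].any (fun a =>
          PySem.Str.startswith part ("-" ++ a) || PySem.Str.startswith part ("--" ++ a))))) = true
instance (command : List String) : Decidable (Pre_build_wandb_name command) := by
  unfold Pre_build_wandb_name; infer_instance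

def pvWitness_build_wandb_name : List String := ["-s=5", "-i"]

def Spec_build_wandb_name (command : List String) (out : String) : Prop := out = build_wandb_name_alt command
instance (command : List String) (out : String) : Decidable (Spec_build_wandb_name command out) := by unfold Spec_build_wandb_name; infer_instance

-- ===== CLAIM (what is proved, stated in full; the proofs are below) =====
def Claim_equal_build_wandb_name : Prop := ∀ (command : List String), Dom_build_wandb_name command → Pre_build_wandb_name command → Spec_build_wandb_name command (build_wandb_name command)

-- ===== LEMMAS AND PROOFS =====

-- B's inner fold over the alias table, one part: the lookup of k changes only if k is unset,
-- is a key of the table and matches the part.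
lemma get?_inner_fold (part : String) (al : List (String × String)) (d : PySem.Dict String String)
    (k : String) :
    ((al.foldl (fun d pa =>
        if (d.get? pa.1).isNone && pvMatches pa.1 part then d.insert pa.1 part else d) d).get? k)
      = if (d.get? k).isNone && pvMatches k part && al.any (fun pa => pa.1 == k) then some part
        else d.get? k := by
  induction al generalizing d with
  | nil => simp
  | cons pa rest ih =>
    simp only [List.foldl_cons, List.any_cons]
    by_cases hc : ((d.get? pa.1).isNone && pvMatches pa.1 part) = true
    · rw [if_pos hc, ih]
      obtain ⟨h1, h2⟩ := by simpa using hc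
      by_cases hk : pa.1 = k
      · subst hk
        rw [PySem.Dict.get?_insert_self]
        simp [h1, h2]
      · rw [PySem.Dict.get?_insert_of_ne _ _ (Ne.symm hk)]
        simp only [beq_eq_false_iff_ne.mpr hk, Bool.false_or]
    · rw [if_neg hc, ih]
      by_cases hk : pa.1 = k
      · subst hk
        simp [Bool.eq_false_iff.mpr hc]
      · simp only [beq_eq_false_iff_ne.mpr hk, Bool.false_or]

-- B's outer fold over command: for a key of the table, the first prefix-match in command order.
lemma get?_outer_fold (cmd : List String) (d : PySem.Dict String String) (k : String)
    (hk : (pvAliases.any (fun pa => pa.1 == k)) = true) :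
    ((cmd.foldl (fun d part =>
        pvAliases.foldl (fun d pa =>
          if (d.get? pa.1).isNone && pvMatches pa.1 part then d.insert pa.1 part else d) d) d).get? k)
      = (d.get? k).or (cmd.find? (fun part => pvMatches k part)) := by
  induction cmd generalizing d with
  | nil => simp
  | cons part rest ih =>
    simp only [List.foldl_cons]
    rw [ih, get?_inner_fold part pvAliases d k, hk]
    cases hd : d.get? k with
    | some v => simp
    | none =>
      by_cases hm : pvMatches k part = true
      · simp [hm]
      · simp [hm]

-- the piece each matched argument contributes
def pvPiece (pa : String × String) (part : String) : String :=
  if PySem.Str.isIn "=" part then pa.2 ++ "-" ++ pvVal part else pa.2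

def pvG (command : List String) (pa : String × String) : Option String :=
  (command.find? (fun part => pvMatches pa.1 part)).map (pvPiece pa)

lemma b_pieces_fold (command : List String) (al : List (String × String)) (ps : List String) :
    (al.foldl (fun ps pa =>
        match command.find? (fun part => pvMatches pa.1 part) with
        | some part => ps ++ [if PySem.Str.isIn "=" part then pa.2 ++ "-" ++ pvVal part else pa.2]
        | none => ps) ps)
      = ps ++ al.filterMap (pvG command) := by
  induction al generalizing ps with
  | nil => simp
  | cons pa rest ih =>
    simp only [List.foldl_cons]
    cases h : command.find? (fun part => pvMatches pa.1 part) with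
    | none => rw [ih]; simp [pvG, h]
    | some part => rw [ih]; simp [pvG, h, pvPiece]

lemma a_string_fold (command : List String) (al : List (String × String)) (acc : String) :
    (al.foldl (fun acc pa =>
        match command.find? (fun part => pvMatches pa.1 part) with
        | some part =>
            if PySem.Str.isIn "=" part then acc ++ (pa.2 ++ "-" ++ pvVal part ++ "-")
            else acc ++ (pa.2 ++ "-")
        | none => acc) acc).toList
      = acc.toList ++ ((al.filterMap (pvG command)).map (fun s => s.toList ++ ['-'])).flatten := by
  induction al generalizing acc with
  | nil => simp
  | cons pa rest ih =>
    simp only [List.foldl_cons]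
    cases h : command.find? (fun part => pvMatches pa.1 part) with
    | none => rw [ih]; simp [pvG, h]
    | some part =>
      rw [ih]
      by_cases he : PySem.Chars.isIn ['='] part.toList = true
      · simp [pvG, h, pvPiece, he, List.append_assoc]
      · simp [pvG, h, pvPiece, he, List.append_assoc]

-- dropping the trailing dash of the dash-terminated pieces is the dash-join of the pieces
lemma dropLast_flatten_dash (ls : List (List Char)) :
    ((ls.map (fun s => s ++ ['-'])).flatten).dropLast = PySem.Chars.join ['-'] ls := by
  induction ls with
  | nil => simp [PySem.Chars.join_nil]
  | cons a rest ih =>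
    cases rest with
    | nil => simp [PySem.Chars.join_singleton]
    | cons b rest' =>
      rw [PySem.Chars.join_cons_cons]
      simp only [List.map_cons, List.flatten_cons]
      rw [List.dropLast_append_of_ne_nil (by simp), List.append_assoc]
      rw [← ih]
      simp

lemma join_strings_toList (ps : List String) :
    (PySem.Str.join "-" ps).toList = PySem.Chars.join ['-'] (ps.map String.toList) := by
  simp [PySem.Str.join]

-- ===== VERDICT (by name: the statement is the Claim_ definition above) =====
theorem build_wandb_name_spec : Claim_equal_build_wandb_name := by
  intro command _ _
  unfold Spec_build_wandb_name build_wandb_name build_wandb_name_alt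
  cases hf : command.find? (fun part => PySem.Str.isIn "--wandb-name=" part) with
  | some part =>
    have hany : command.any (fun part => PySem.Str.isIn "--wandb-name=" part) = true :=
      List.any_eq_true.mpr ⟨part, List.mem_of_find?_eq_some hf, List.find?_some hf⟩
    simp only [hany, if_pos]
  | none =>
    have hany : command.any (fun part => PySem.Str.isIn "--wandb-name=" part) = false := by
      rw [List.any_eq_false]
      intro x hx
      simpa using List.find?_eq_none.mp hf x hx
    rw [hany]
    simp only [Bool.false_eq_true, if_false]
    -- B's dict lookups are the per-argument first matches, in command order
    have hpieces :
        (pvAliases.foldl (fun ps pa =>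
            match (command.foldl (fun d part =>
                pvAliases.foldl (fun d pa =>
                  if (d.get? pa.1).isNone && pvMatches pa.1 part then d.insert pa.1 part else d) d)
                (PySem.Dict.empty : PySem.Dict String String)).get? pa.1 with
            | some part => ps ++ [if PySem.Str.isIn "=" part then pa.2 ++ "-" ++ pvVal part else pa.2]
            | none => ps) ([] : List String))
          = pvAliases.filterMap (pvG command) := by
      rw [PySem.List.foldl_congr_mem pvAliases _ (fun ps pa =>
          match command.find? (fun part => pvMatches pa.1 part) with
          | some part => ps ++ [if PySem.Str.isIn "=" part then pa.2 ++ "-" ++ pvVal part else pa.2]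
          | none => ps) [] ?_]
      · exact b_pieces_fold command pvAliases []
      · intro acc pa hpa
        rw [get?_outer_fold command PySem.Dict.empty pa.1
          (List.any_eq_true.mpr ⟨pa, hpa, beq_self_eq_true _⟩)]
        simp
    refine String.toList_inj.mp ?_
    rw [PySem.Str.slice_to_neg_one, a_string_fold, hpieces, join_strings_toList,
      ← dropLast_flatten_dash]
    simp only [List.map_map]
    rfl
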